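-- pv_equiv track=rewrite | github.com/peteroupc/peteroupc.github.io | randomgen.py | _getSolTableSorted
-- ===== SOURCE A (Python) =====
-- def _getSolTableSorted(n, mn, mx, sum):
--     mrange = mx - mn
--     t = [
--         [[0 for _ in range(sum + 1)] for _ in range(mrange + 1)]
--         for _ in range(n + 1)
--     ]
--     for i in range(0, mrange + 1):
--         t[0][i][0] = 1
--     for i in range(1, n + 1):
--         for k in range(0, sum + 1):
--             t[i][0][k] = t[i - 1][0][k]
--         for j in range(1, mrange + 1):
--             for k in range(0, sum + 1):
--                 kj = k - j
--                 v = t[i][j - 1][k]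
--                 if kj >= 0:
--                     v += t[i - 1][j][k - j]
--                 t[i][j][k] = v
--     return t
-- ===== SOURCE B (Python) =====
-- def _getSolTableSorted(n, mn, mx, sum):
--     mrange = mx - mn
--     t = []
--     for i in range(n + 1):
--         if i == 0:
--             layer = [
--                 [1 if k == 0 else 0 for k in range(sum + 1)]
--                 for _ in range(mrange + 1)
--             ]
--         else:
--             prev = t[i - 1]
--             layer = []
--             for j in range(mrange + 1):
--                 row = []
--                 for k in range(sum + 1):
--                     acc = 0
--                     for jp in range(j + 1):
--                         if k - jp >= 0:
--                             acc += prev[jp][k - jp]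
--                     row.append(acc)
--                 layer.append(row)
--         t.append(layer)
--     return t
-- ===== Notes on version B (the rewrite author's own statement) =====
-- stated objective: alternative
-- what changed: B drops A's pre-allocated mutable 3D table and same-layer prefix recurrence t[i][j][k]=t[i][j-1][k]+t[i-1][j][k-j], and instead builds the table layer by layer, computing each entry directly as an explicit sum over the previous layer (sum of t[i-1][jp][k-jp] for jp in 0..j with k-jp>=0).
import Mathlib
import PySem

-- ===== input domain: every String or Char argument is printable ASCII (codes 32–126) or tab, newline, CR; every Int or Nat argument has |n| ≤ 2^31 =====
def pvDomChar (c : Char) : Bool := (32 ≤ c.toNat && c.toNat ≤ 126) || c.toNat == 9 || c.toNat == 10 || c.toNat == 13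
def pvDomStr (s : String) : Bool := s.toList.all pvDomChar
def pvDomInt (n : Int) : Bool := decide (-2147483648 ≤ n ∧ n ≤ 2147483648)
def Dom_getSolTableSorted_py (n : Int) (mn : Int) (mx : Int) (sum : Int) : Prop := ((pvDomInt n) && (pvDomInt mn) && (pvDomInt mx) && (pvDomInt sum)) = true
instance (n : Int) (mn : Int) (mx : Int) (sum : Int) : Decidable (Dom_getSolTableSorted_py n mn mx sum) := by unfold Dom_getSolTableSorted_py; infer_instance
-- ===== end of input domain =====

-- B replaces A's in-place 3D table with its same-layer prefix recurrence by a layer-by-layer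
-- functional build that computes each entry directly as an explicit sum over the previous layer
-- (objective: alternative decomposition, not faster).

-- ===== PORT A =====
-- All indices A writes/reads are produced by ranges starting at 0/1, hence nonnegative and (on Pre_)
-- in range, so pyGetD/pySetD with a default are exact here (Python would raise only outside Pre_).
def pvGet2 (L : List (List Int)) (j k : Int) : Int :=
  PySem.List.pyGetD (PySem.List.pyGetD L j []) k 0

def pvGet3 (t : List (List (List Int))) (i j k : Int) : Int :=
  pvGet2 (PySem.List.pyGetD t i []) j k

def pvSet3 (t : List (List (List Int))) (i j k : Int) (v : Int) : List (List (List Int)) :=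
  PySem.List.pySetD t i
    (PySem.List.pySetD (PySem.List.pyGetD t i []) j
      (PySem.List.pySetD (PySem.List.pyGetD (PySem.List.pyGetD t i []) j []) k v))

def getSolTableSorted_py (n : Int) (mn : Int) (mx : Int) (sum : Int) : List (List (List Int)) :=
  let mrange := mx - mn
  let t0 := (PySem.List.pyRange 0 (n+1) 1).map (fun _ =>
    (PySem.List.pyRange 0 (mrange+1) 1).map (fun _ =>
      (PySem.List.pyRange 0 (sum+1) 1).map (fun _ => (0:Int))))
  let t1 := (PySem.List.pyRange 0 (mrange+1) 1).foldl (fun t i => pvSet3 t 0 i 0 1) t0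
  (PySem.List.pyRange 1 (n+1) 1).foldl (fun t i =>
    let t := (PySem.List.pyRange 0 (sum+1) 1).foldl
      (fun t k => pvSet3 t i 0 k (pvGet3 t (i-1) 0 k)) t
    (PySem.List.pyRange 1 (mrange+1) 1).foldl (fun t j =>
      (PySem.List.pyRange 0 (sum+1) 1).foldl (fun t k =>
        let kj := k - j
        let v := pvGet3 t i (j-1) k
        let v := if 0 ≤ kj then v + pvGet3 t (i-1) j (k - j) else v
        pvSet3 t i j k v) t) t) t1

-- ===== PORT B =====
def getSolTableSorted_py_alt (n : Int) (mn : Int) (mx : Int) (sum : Int) : List (List (List Int)) :=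
  let mrange := mx - mn
  (PySem.List.pyRange 0 (n+1) 1).foldl (fun t i =>
    let layer :=
      if i == 0 then
        (PySem.List.pyRange 0 (mrange+1) 1).map (fun _ =>
          (PySem.List.pyRange 0 (sum+1) 1).map (fun k => if k == 0 then (1:Int) else 0))
      else
        let prev := PySem.List.pyGetD t (i-1) []
        (PySem.List.pyRange 0 (mrange+1) 1).foldl (fun layer j =>
          let row := (PySem.List.pyRange 0 (sum+1) 1).foldl (fun row k =>
            let acc := (PySem.List.pyRange 0 (j+1) 1).foldl (fun acc jp =>
              if 0 ≤ k - jp then acc + pvGet2 prev jp (k - jp) else acc) 0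
            row ++ [acc]) []
          layer ++ [row]) []
    t ++ [layer]) []

-- ===== PRECONDITION & SPEC =====
-- Pre_ excludes exactly the inputs on which A raises IndexError: it writes into a table with an
-- empty dimension (mx-mn ≥ 0 with n < 0 or sum < 0; or n ≥ 1, sum ≥ 0 with mx-mn < 0).
def Pre_getSolTableSorted_py (n : Int) (mn : Int) (mx : Int) (sum : Int) : Prop :=
  (0 ≤ mx - mn → 0 ≤ n ∧ 0 ≤ sum) ∧ (mx - mn < 0 → n ≤ 0 ∨ sum < 0)
instance (n : Int) (mn : Int) (mx : Int) (sum : Int) : Decidable (Pre_getSolTableSorted_py n mn mx sum) := by unfold Pre_getSolTableSorted_py; infer_instance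

def pvWitness_getSolTableSorted_py : Int × Int × Int × Int := (2, 0, 2, 3)

def Spec_getSolTableSorted_py (n : Int) (mn : Int) (mx : Int) (sum : Int) (out : List (List (List Int))) : Prop := out = getSolTableSorted_py_alt n mn mx sum
instance (n : Int) (mn : Int) (mx : Int) (sum : Int) (out : List (List (List Int))) : Decidable (Spec_getSolTableSorted_py n mn mx sum out) := by unfold Spec_getSolTableSorted_py; infer_instance

-- ===== CLAIM (what is proved, stated in full; the proofs are below) =====
def Claim_equal_getSolTableSorted_py : Prop := ∀ (n : Int) (mn : Int) (mx : Int) (sum : Int), Dom_getSolTableSorted_py n mn mx sum → Pre_getSolTableSorted_py n mn mx sum → Spec_getSolTableSorted_py n mn mx sum (getSolTableSorted_py n mn mx sum)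

-- ===== LEMMAS AND PROOFS =====

-- reference table, phrased exactly in the shape the converted ports take
def pvZR (S : Nat) : List Int := (List.range S).map (fun (_ : Nat) => (0:Int))
def pvZ (M S : Nat) : List (List Int) := (List.range M).map (fun (_ : Nat) => pvZR S)
def pvRow0 (S : Nat) : List Int := (List.range S).map (fun (k : Nat) => if (k:Int) == 0 then (1:Int) else 0)
def pvBase (M S : Nat) : List (List Int) := (List.range M).map (fun (_ : Nat) => pvRow0 S)
def pvCell (prev : List (List Int)) (j k : Nat) : Int :=
  (List.range (j+1)).foldl (fun (acc : Int) (jp : Nat) =>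
    if 0 ≤ (k:Int) - (jp:Int) then acc + pvGet2 prev (jp:Int) ((k:Int) - (jp:Int)) else acc) 0
def pvStep (M S : Nat) (prev : List (List Int)) : List (List Int) :=
  (List.range M).map (fun (j : Nat) => (List.range S).map (fun (k : Nat) => pvCell prev j k))
def pvLayer (M S : Nat) : Nat → List (List Int)
  | 0 => pvBase M S
  | i+1 => pvStep M S (pvLayer M S i)
def pvTable (N M S : Nat) : List (List (List Int)) := (List.range (N+1)).map (pvLayer M S)

theorem pvFoldInv {α : Type} (f : α → Nat → α) (P : Nat → α → Prop) :
    ∀ (M : Nat) (a : α), P 0 a → (∀ i x, i < M → P i x → P (i+1) (f x i)) →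
    P M ((List.range M).foldl f a) := by
  intro M
  induction M with
  | zero => intro a h0 _; simpa using h0
  | succ m ih =>
    intro a h0 hs
    rw [List.range_succ, List.foldl_append]
    exact hs m _ (Nat.lt_succ_self m) (ih a h0 (fun i x hi => hs i x (Nat.lt_succ_of_lt hi)))

theorem pvMapRangeCongr {α : Type} (m : Nat) (f g : Nat → α) (h : ∀ r, r < m → f r = g r) :
    (List.range m).map f = (List.range m).map g :=
  List.map_congr_left (fun a ha => h a (List.mem_range.mp ha))

theorem pvSetMapRange {α : Type} (f : Nat → α) (m c : Nat) (v : α) (_ : c < m) :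
    ((List.range m).map f).set c v = (List.range m).map (fun r => if r = c then v else f r) := by
  apply List.ext_getElem
  · simp
  · intro i h1 h2
    simp only [List.getElem_set, List.getElem_map, List.getElem_range]
    by_cases h : c = i
    · subst h; simp
    · simp only [if_neg h]
      rw [if_neg (by omega)]

theorem pvRange0 (m : Nat) : PySem.List.pyRange 0 ((m:Int)) 1 = (List.range m).map (fun (k : Nat) => (k:Int)) := by
  rw [PySem.List.pyRange_one]
  have : ((m:Int) - 0).toNat = m := by omega
  rw [this]
  simp

theorem pvRange1 (m : Nat) : PySem.List.pyRange 1 (((m+1):Nat):Int) 1 = (List.range m).map (fun (k : Nat) => (k:Int)+1) := by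
  rw [PySem.List.pyRange_one]
  have : ((((m+1):Nat):Int) - 1).toNat = m := by push_cast; omega
  rw [this]
  apply pvMapRangeCongr
  intro r _
  omega

theorem pvCell_zero (prev : List (List Int)) (k : Nat) :
    pvCell prev 0 k = pvGet2 prev 0 (k:Int) := by
  unfold pvCell
  simp

theorem pvCell_succ (prev : List (List Int)) (j k : Nat) :
    pvCell prev (j+1) k = pvCell prev j k +
      (if 0 ≤ (k:Int) - ((j+1 : Nat):Int) then pvGet2 prev ((j+1 : Nat):Int) ((k:Int) - ((j+1 : Nat):Int)) else 0) := by
  unfold pvCell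
  rw [List.range_succ, List.foldl_append]
  simp only [List.foldl_cons, List.foldl_nil]
  split
  · rfl
  · simp

theorem pvZR_set (S : Nat) (_ : 0 < S) : (pvZR S).set 0 1 = pvRow0 S := by
  apply List.ext_getElem
  · simp [pvZR, pvRow0]
  · intro i h1 h2
    simp only [pvZR, pvRow0, List.getElem_set, List.getElem_map, List.getElem_range]
    by_cases h : i = 0
    · subst h; simp
    · rw [if_neg (by omega), if_neg (by simpa using h)]

-- the body of B's outer loop, named for the proofs (definitionally equal to the lambda in the port)
def pvBBody (mrange sum : Int) (t : List (List (List Int))) (i : Int) : List (List (List Int)) :=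
  let layer :=
    if i == 0 then
      (PySem.List.pyRange 0 (mrange+1) 1).map (fun _ =>
        (PySem.List.pyRange 0 (sum+1) 1).map (fun k => if k == 0 then (1:Int) else 0))
    else
      let prev := PySem.List.pyGetD t (i-1) []
      (PySem.List.pyRange 0 (mrange+1) 1).foldl (fun layer j =>
        let row := (PySem.List.pyRange 0 (sum+1) 1).foldl (fun row k =>
          let acc := (PySem.List.pyRange 0 (j+1) 1).foldl (fun acc jp =>
            if 0 ≤ k - jp then acc + pvGet2 prev jp (k - jp) else acc) 0
          row ++ [acc]) []
        layer ++ [row]) []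
  t ++ [layer]

theorem pvB_unfold (n mn mx sum : Int) :
    getSolTableSorted_py_alt n mn mx sum
      = (PySem.List.pyRange 0 (n+1) 1).foldl (pvBBody (mx-mn) sum) [] := rfl

theorem pvCast_succ (m : Nat) : ((m:Int)+1) = ((m+1 : Nat):Int) := by push_cast; ring

theorem pvB_step (MR SV : Nat) (i : Nat) (t : List (List (List Int)))
    (ht : t = (List.range i).map (pvLayer (MR+1) (SV+1))) :
    pvBBody ((MR:Int)) ((SV:Int)) t ((i:Int)) = (List.range (i+1)).map (pvLayer (MR+1) (SV+1)) := by
  subst ht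
  unfold pvBBody
  by_cases hi : i = 0
  · subst hi
    simp only [Nat.cast_zero, beq_self_eq_true, if_true, pvCast_succ, pvRange0, List.map_map]
    rw [List.range_succ]
    simp [pvLayer, pvBase, pvRow0, Function.comp_def, List.range_succ]
  · have hne : ((i:Int) == 0) = false := by
      simp only [beq_eq_false_iff_ne]; exact_mod_cast hi
    simp only [hne, Bool.false_eq_true, if_false]
    obtain ⟨i', rfl⟩ : ∃ i', i = i'+1 := ⟨i-1, by omega⟩
    have h1 : ((i'+1 : Nat):Int) - 1 = ((i' : Nat):Int) := by push_cast; ring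
    rw [h1, PySem.List.pyGetD_natCast, PySem.List.getD_map_range _ _ _ _ (by omega)]
    simp only [pvCast_succ, pvRange0, List.foldl_map]
    simp only [PySem.List.foldl_append_singleton_eq_map, List.nil_append]
    have hl : (List.range (MR+1)).map (fun (j : Nat) => (List.range (SV+1)).map (fun (k : Nat) =>
        (List.range (j+1)).foldl (fun (acc : Int) (jp : Nat) =>
          if 0 ≤ (k:Int) - (jp:Int) then acc + pvGet2 (pvLayer (MR+1) (SV+1) i') (jp:Int) ((k:Int) - (jp:Int)) else acc) 0))
        = pvLayer (MR+1) (SV+1) (i'+1) := rfl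
    rw [hl]
    simp [List.range_succ]


theorem pvB_main (mn mx : Int) (N MR SV : Nat) (hm : mx - mn = (MR:Int)) :
    getSolTableSorted_py_alt (N:Int) mn mx (SV:Int) = pvTable N (MR+1) (SV+1) := by
  rw [pvB_unfold, hm, pvCast_succ N, pvRange0, List.foldl_map]
  exact pvFoldInv (fun t (i : Nat) => pvBBody (MR:Int) (SV:Int) t (i:Int))
    (fun c t => t = (List.range c).map (pvLayer (MR+1) (SV+1))) (N+1) []
    (by simp) (fun i x _ hx => pvB_step MR SV i x hx)

-- A's loop bodies, named for the proofs (definitionally equal to the lambdas in the port)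
def pvKBody0 (i : Int) (t : List (List (List Int))) (k : Int) : List (List (List Int)) :=
  pvSet3 t i 0 k (pvGet3 t (i-1) 0 k)
def pvKBody (i j : Int) (t : List (List (List Int))) (k : Int) : List (List (List Int)) :=
  pvSet3 t i j k (if 0 ≤ k - j then pvGet3 t i (j-1) k + pvGet3 t (i-1) j (k - j) else pvGet3 t i (j-1) k)
def pvJBody (sum i : Int) (t : List (List (List Int))) (j : Int) : List (List (List Int)) :=
  (PySem.List.pyRange 0 (sum+1) 1).foldl (pvKBody i j) t
def pvIBody (mrange sum : Int) (t : List (List (List Int))) (i : Int) : List (List (List Int)) :=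
  (PySem.List.pyRange 1 (mrange+1) 1).foldl (pvJBody sum i)
    ((PySem.List.pyRange 0 (sum+1) 1).foldl (pvKBody0 i) t)

theorem pvA_unfold (n mn mx sum : Int) :
    getSolTableSorted_py n mn mx sum
      = (PySem.List.pyRange 1 (n+1) 1).foldl (pvIBody (mx-mn) sum)
          ((PySem.List.pyRange 0 (mx-mn+1) 1).foldl (fun t i => pvSet3 t 0 i 0 1)
            ((PySem.List.pyRange 0 (n+1) 1).map (fun _ =>
              (PySem.List.pyRange 0 (mx-mn+1) 1).map (fun _ =>
                (PySem.List.pyRange 0 (sum+1) 1).map (fun _ => (0:Int)))))) := rfl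

-- nat-index forms of the table accessors
theorem pvSet3_nat (t : List (List (List Int))) (i j k : Nat) (v : Int) :
    pvSet3 t (i:Int) (j:Int) (k:Int) v
      = t.set i ((t.getD i []).set j (((t.getD i []).getD j []).set k v)) := by
  simp [pvSet3, PySem.List.pySetD_natCast, PySem.List.pyGetD_natCast]

theorem pvGet3_nat (t : List (List (List Int))) (i j k : Nat) :
    pvGet3 t (i:Int) (j:Int) (k:Int) = ((t.getD i []).getD j []).getD k 0 := by
  simp [pvGet3, pvGet2, PySem.List.pyGetD_natCast]

-- the evolving table shape: layers below c final, layer c = mid, layers above c still zero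
def pvOut (N M S c : Nat) (mid : List (List Int)) : List (List (List Int)) :=
  (List.range (N+1)).map (fun (i : Nat) => if i < c then pvLayer M S i else if i = c then mid else pvZ M S)

theorem pvOut_getD_lt (N M S c r : Nat) (mid : List (List Int)) (hr : r < c) (hc : c < N+1) :
    (pvOut N M S c mid).getD r [] = pvLayer M S r := by
  unfold pvOut; rw [PySem.List.getD_map_range _ _ _ _ (by omega), if_pos hr]

theorem pvOut_getD_self (N M S c : Nat) (mid : List (List Int)) (hc : c < N+1) :
    (pvOut N M S c mid).getD c [] = mid := by
  unfold pvOut; rw [PySem.List.getD_map_range _ _ _ _ (by omega), if_neg (lt_irrefl c), if_pos rfl]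

theorem pvOut_set (N M S c : Nat) (mid v : List (List Int)) (hc : c < N+1) :
    (pvOut N M S c mid).set c v = pvOut N M S c v := by
  unfold pvOut; rw [pvSetMapRange _ _ _ _ (by omega)]
  apply pvMapRangeCongr; intro r hr
  by_cases h1 : r = c
  · subst h1; rw [if_pos rfl, if_neg (lt_irrefl r), if_pos rfl]
  · rw [if_neg h1]
    by_cases h2 : r < c
    · rw [if_pos h2, if_pos h2]
    · rw [if_neg h2, if_neg h2, if_neg h1, if_neg h1]

theorem pvOut_congr (N M S c : Nat) {mid mid' : List (List Int)} (h : mid = mid') :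
    pvOut N M S c mid = pvOut N M S c mid' := by rw [h]

theorem pvOut_shift (N M S c : Nat) :
    pvOut N M S c (pvLayer M S c) = pvOut N M S (c+1) (pvZ M S) := by
  unfold pvOut; apply pvMapRangeCongr; intro r hr
  by_cases h1 : r < c
  · rw [if_pos h1, if_pos (by omega)]
  · rw [if_neg h1]
    by_cases h2 : r = c
    · rw [if_pos h2, if_pos (by omega), h2]
    · rw [if_neg h2, if_neg (by omega)]
      by_cases h3 : r = c+1
      · rw [if_pos h3]
      · rw [if_neg h3]

-- partially-written layers
def pvR0 (M S c kk : Nat) : List Int :=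
  (List.range S).map (fun (k : Nat) => if k < kk then pvGet2 (pvLayer M S c) 0 (k:Int) else 0)
def pvL0 (M S c kk : Nat) : List (List Int) :=
  (List.range M).map (fun (r : Nat) => if r = 0 then pvR0 M S c kk else pvZR S)
def pvPart (M S c jj : Nat) : List (List Int) :=
  (List.range M).map (fun (r : Nat) =>
    if r ≤ jj then (List.range S).map (fun (k : Nat) => pvCell (pvLayer M S c) r k) else pvZR S)
def pvPartRow (M S c jc kk : Nat) : List (List Int) :=
  (List.range M).map (fun (r : Nat) =>
    if r ≤ jc then (List.range S).map (fun (k : Nat) => pvCell (pvLayer M S c) r k)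
    else if r = jc+1 then (List.range S).map (fun (k : Nat) => if k < kk then pvCell (pvLayer M S c) (jc+1) k else 0)
    else pvZR S)
def pvBaseP (M S c : Nat) : List (List Int) :=
  (List.range M).map (fun (r : Nat) => if r < c then pvRow0 S else pvZR S)

-- stage 1: the t[0][i][0] = 1 loop
theorem pvInit_step (N MR SV c : Nat) (hc : c < MR+1) (t : List (List (List Int)))
    (ht : t = pvOut N (MR+1) (SV+1) 0 (pvBaseP (MR+1) (SV+1) c)) :
    pvSet3 t 0 (c:Int) 0 1 = pvOut N (MR+1) (SV+1) 0 (pvBaseP (MR+1) (SV+1) (c+1)) := by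
  subst ht
  have h := pvSet3_nat (pvOut N (MR+1) (SV+1) 0 (pvBaseP (MR+1) (SV+1) c)) 0 c 0 1
  simp only [Nat.cast_zero] at h
  rw [h, pvOut_getD_self _ _ _ _ _ (by omega)]
  rw [show (pvBaseP (MR+1) (SV+1) c).getD c [] = pvZR (SV+1) from by
        unfold pvBaseP; rw [PySem.List.getD_map_range _ _ _ _ (by omega), if_neg (lt_irrefl c)]]
  rw [pvZR_set _ (by omega)]
  rw [show (pvBaseP (MR+1) (SV+1) c).set c (pvRow0 (SV+1)) = pvBaseP (MR+1) (SV+1) (c+1) from by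
        unfold pvBaseP; rw [pvSetMapRange _ _ _ _ (by omega)]
        apply pvMapRangeCongr; intro r hr
        by_cases h1 : r = c
        · subst h1; rw [if_pos rfl, if_pos (by omega)]
        · rw [if_neg h1]
          by_cases h2 : r < c
          · rw [if_pos h2, if_pos (by omega)]
          · rw [if_neg h2, if_neg (by omega)]]
  exact pvOut_set _ _ _ _ _ _ (by omega)

theorem pvStage1 (N MR SV : Nat) :
    ((List.range (MR+1)).foldl (fun t (c : Nat) => pvSet3 t 0 (c:Int) 0 1)
      (pvOut N (MR+1) (SV+1) 0 (pvBaseP (MR+1) (SV+1) 0)))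
    = pvOut N (MR+1) (SV+1) 0 (pvBase (MR+1) (SV+1)) := by
  have h := pvFoldInv (fun t (c : Nat) => pvSet3 t 0 (c:Int) 0 1)
    (fun c t => t = pvOut N (MR+1) (SV+1) 0 (pvBaseP (MR+1) (SV+1) c)) (MR+1) _ rfl
    (fun c x hc hx => pvInit_step N MR SV c hc x hx)
  rw [h]
  apply pvOut_congr
  unfold pvBaseP pvBase; apply pvMapRangeCongr; intro r hr; rw [if_pos (by omega)]

-- stage 2: the t[i][0][k] = t[i-1][0][k] loop
theorem pvK0_step (N MR SV c kk : Nat) (hc : c < N) (hkk : kk < SV+1) (t : List (List (List Int)))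
    (ht : t = pvOut N (MR+1) (SV+1) (c+1) (pvL0 (MR+1) (SV+1) c kk)) :
    pvKBody0 ((c+1 : Nat):Int) t (kk:Int) = pvOut N (MR+1) (SV+1) (c+1) (pvL0 (MR+1) (SV+1) c (kk+1)) := by
  subst ht
  unfold pvKBody0
  have h1 : ((c+1:Nat):Int) - 1 = (c:Int) := by push_cast; ring
  rw [h1]
  rw [show pvGet3 (pvOut N (MR+1) (SV+1) (c+1) (pvL0 (MR+1) (SV+1) c kk)) (c:Int) 0 (kk:Int)
        = pvGet2 (pvLayer (MR+1) (SV+1) c) 0 (kk:Int) from by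
      unfold pvGet3
      rw [PySem.List.pyGetD_natCast, pvOut_getD_lt _ _ _ _ _ _ (by omega) (by omega)]]
  have h2 := pvSet3_nat (pvOut N (MR+1) (SV+1) (c+1) (pvL0 (MR+1) (SV+1) c kk)) (c+1) 0 kk
    (pvGet2 (pvLayer (MR+1) (SV+1) c) 0 (kk:Int))
  simp only [Nat.cast_zero] at h2
  rw [h2, pvOut_getD_self _ _ _ _ _ (by omega)]
  rw [show (pvL0 (MR+1) (SV+1) c kk).getD 0 [] = pvR0 (MR+1) (SV+1) c kk from by
        unfold pvL0; rw [PySem.List.getD_map_range _ _ _ _ (by omega), if_pos rfl]]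
  rw [show (pvR0 (MR+1) (SV+1) c kk).set kk (pvGet2 (pvLayer (MR+1) (SV+1) c) 0 (kk:Int))
        = pvR0 (MR+1) (SV+1) c (kk+1) from by
        unfold pvR0; rw [pvSetMapRange _ _ _ _ (by omega)]
        apply pvMapRangeCongr; intro r hr
        by_cases h3 : r = kk
        · subst h3; rw [if_pos rfl, if_pos (by omega)]
        · rw [if_neg h3]
          by_cases h4 : r < kk
          · rw [if_pos h4, if_pos (by omega)]
          · rw [if_neg h4, if_neg (by omega)]]
  rw [show (pvL0 (MR+1) (SV+1) c kk).set 0 (pvR0 (MR+1) (SV+1) c (kk+1)) = pvL0 (MR+1) (SV+1) c (kk+1) from by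
        unfold pvL0; rw [pvSetMapRange _ _ _ _ (by omega)]
        apply pvMapRangeCongr; intro r hr
        by_cases h3 : r = 0
        · subst h3; rw [if_pos rfl, if_pos rfl]
        · rw [if_neg h3, if_neg h3, if_neg h3]]
  exact pvOut_set _ _ _ _ _ _ (by omega)

theorem pvStage2 (N MR SV c : Nat) (hc : c < N) :
    ((List.range (SV+1)).foldl (fun t (kk : Nat) => pvKBody0 ((c+1 : Nat):Int) t (kk:Int))
      (pvOut N (MR+1) (SV+1) c (pvLayer (MR+1) (SV+1) c)))
    = pvOut N (MR+1) (SV+1) (c+1) (pvL0 (MR+1) (SV+1) c (SV+1)) := by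
  have h0 : pvOut N (MR+1) (SV+1) c (pvLayer (MR+1) (SV+1) c)
      = pvOut N (MR+1) (SV+1) (c+1) (pvL0 (MR+1) (SV+1) c 0) := by
    rw [pvOut_shift]; apply pvOut_congr
    unfold pvZ pvL0; apply pvMapRangeCongr; intro r hr
    by_cases h : r = 0
    · subst h; rw [if_pos rfl]
      unfold pvR0 pvZR; apply pvMapRangeCongr; intro k hk; rw [if_neg (by omega)]
    · rw [if_neg h]
  rw [h0]
  exact pvFoldInv _ (fun kk t => t = pvOut N (MR+1) (SV+1) (c+1) (pvL0 (MR+1) (SV+1) c kk)) (SV+1) _ rfl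
    (fun kk x hkk hx => pvK0_step N MR SV c kk hc hkk x hx)

-- stage 3: the inner t[i][j][k] loop
theorem pvKRow_step (N MR SV c jc kk : Nat) (hc : c < N) (hjc : jc < MR) (hkk : kk < SV+1)
    (t : List (List (List Int)))
    (ht : t = pvOut N (MR+1) (SV+1) (c+1) (pvPartRow (MR+1) (SV+1) c jc kk)) :
    pvKBody ((c+1 : Nat):Int) ((jc+1 : Nat):Int) t (kk:Int)
      = pvOut N (MR+1) (SV+1) (c+1) (pvPartRow (MR+1) (SV+1) c jc (kk+1)) := by
  subst ht
  unfold pvKBody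
  have hj1 : ((jc+1:Nat):Int) - 1 = (jc:Int) := by push_cast; ring
  have hc1 : ((c+1:Nat):Int) - 1 = (c:Int) := by push_cast; ring
  rw [hj1, hc1]
  rw [show pvGet3 (pvOut N (MR+1) (SV+1) (c+1) (pvPartRow (MR+1) (SV+1) c jc kk)) ((c+1 : Nat):Int) (jc:Int) (kk:Int)
        = pvCell (pvLayer (MR+1) (SV+1) c) jc kk from by
      rw [pvGet3_nat, pvOut_getD_self _ _ _ _ _ (by omega)]
      unfold pvPartRow
      rw [PySem.List.getD_map_range _ _ _ _ (by omega), if_pos (le_refl jc),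
        PySem.List.getD_map_range _ _ _ _ (by omega)]]
  rw [show pvGet3 (pvOut N (MR+1) (SV+1) (c+1) (pvPartRow (MR+1) (SV+1) c jc kk)) (c:Int) ((jc+1 : Nat):Int) ((kk:Int) - ((jc+1 : Nat):Int))
        = pvGet2 (pvLayer (MR+1) (SV+1) c) ((jc+1 : Nat):Int) ((kk:Int) - ((jc+1 : Nat):Int)) from by
      unfold pvGet3
      rw [PySem.List.pyGetD_natCast, pvOut_getD_lt _ _ _ _ _ _ (by omega) (by omega)]]
  rw [show (if 0 ≤ (kk:Int) - ((jc+1 : Nat):Int) then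
        pvCell (pvLayer (MR+1) (SV+1) c) jc kk + pvGet2 (pvLayer (MR+1) (SV+1) c) ((jc+1 : Nat):Int) ((kk:Int) - ((jc+1 : Nat):Int))
      else pvCell (pvLayer (MR+1) (SV+1) c) jc kk) = pvCell (pvLayer (MR+1) (SV+1) c) (jc+1) kk from by
      rw [pvCell_succ]; split <;> simp]
  have h2 := pvSet3_nat (pvOut N (MR+1) (SV+1) (c+1) (pvPartRow (MR+1) (SV+1) c jc kk)) (c+1) (jc+1) kk
    (pvCell (pvLayer (MR+1) (SV+1) c) (jc+1) kk)
  rw [h2, pvOut_getD_self _ _ _ _ _ (by omega)]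
  rw [show (pvPartRow (MR+1) (SV+1) c jc kk).getD (jc+1) []
        = (List.range (SV+1)).map (fun (k : Nat) => if k < kk then pvCell (pvLayer (MR+1) (SV+1) c) (jc+1) k else 0) from by
        unfold pvPartRow
        rw [PySem.List.getD_map_range _ _ _ _ (by omega), if_neg (by omega), if_pos rfl]]
  rw [show ((List.range (SV+1)).map (fun (k : Nat) => if k < kk then pvCell (pvLayer (MR+1) (SV+1) c) (jc+1) k else 0)).set kk
        (pvCell (pvLayer (MR+1) (SV+1) c) (jc+1) kk)
        = (List.range (SV+1)).map (fun (k : Nat) => if k < kk+1 then pvCell (pvLayer (MR+1) (SV+1) c) (jc+1) k else 0) from by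
        rw [pvSetMapRange _ _ _ _ (by omega)]
        apply pvMapRangeCongr; intro r hr
        by_cases h3 : r = kk
        · subst h3; rw [if_pos rfl, if_pos (by omega)]
        · rw [if_neg h3]
          by_cases h4 : r < kk
          · rw [if_pos h4, if_pos (by omega)]
          · rw [if_neg h4, if_neg (by omega)]]
  rw [show (pvPartRow (MR+1) (SV+1) c jc kk).set (jc+1)
        ((List.range (SV+1)).map (fun (k : Nat) => if k < kk+1 then pvCell (pvLayer (MR+1) (SV+1) c) (jc+1) k else 0))
        = pvPartRow (MR+1) (SV+1) c jc (kk+1) from by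
        unfold pvPartRow; rw [pvSetMapRange _ _ _ _ (by omega)]
        apply pvMapRangeCongr; intro r hr
        by_cases h3 : r = jc+1
        · subst h3; rw [if_pos rfl, if_neg (by omega), if_pos rfl]
        · rw [if_neg h3]
          by_cases h4 : r ≤ jc
          · rw [if_pos h4, if_pos h4]
          · rw [if_neg h4, if_neg h4, if_neg h3, if_neg h3]]
  exact pvOut_set _ _ _ _ _ _ (by omega)

-- stage 4: one iteration of the j loop
theorem pvJ_step (N MR SV c jc : Nat) (hc : c < N) (hjc : jc < MR) (t : List (List (List Int)))
    (ht : t = pvOut N (MR+1) (SV+1) (c+1) (pvPart (MR+1) (SV+1) c jc)) :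
    pvJBody (SV:Int) ((c+1 : Nat):Int) t ((jc:Int)+1) = pvOut N (MR+1) (SV+1) (c+1) (pvPart (MR+1) (SV+1) c (jc+1)) := by
  subst ht
  unfold pvJBody
  rw [pvCast_succ SV, pvCast_succ jc, pvRange0, List.foldl_map]
  have h0 : pvOut N (MR+1) (SV+1) (c+1) (pvPart (MR+1) (SV+1) c jc)
      = pvOut N (MR+1) (SV+1) (c+1) (pvPartRow (MR+1) (SV+1) c jc 0) := by
    apply pvOut_congr
    unfold pvPart pvPartRow; apply pvMapRangeCongr; intro r hr
    by_cases h1 : r ≤ jc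
    · rw [if_pos h1, if_pos h1]
    · rw [if_neg h1, if_neg h1]
      by_cases h2 : r = jc+1
      · subst h2; rw [if_pos rfl]
        unfold pvZR; apply pvMapRangeCongr; intro k hk; rw [if_neg (by omega)]
      · rw [if_neg h2]
  rw [h0]
  have h := pvFoldInv (fun t (kk : Nat) => pvKBody ((c+1 : Nat):Int) ((jc+1 : Nat):Int) t (kk:Int))
    (fun kk t => t = pvOut N (MR+1) (SV+1) (c+1) (pvPartRow (MR+1) (SV+1) c jc kk)) (SV+1) _ rfl
    (fun kk x hkk hx => pvKRow_step N MR SV c jc kk hc hjc hkk x hx)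
  rw [h]
  apply pvOut_congr
  unfold pvPartRow pvPart; apply pvMapRangeCongr; intro r hr
  by_cases h1 : r ≤ jc
  · rw [if_pos h1, if_pos (by omega)]
  · by_cases h2 : r = jc+1
    · subst h2; rw [if_neg h1, if_pos rfl, if_pos (le_refl _)]
      apply pvMapRangeCongr; intro k hk; rw [if_pos (by omega)]
    · rw [if_neg h1, if_neg h2, if_neg (by omega)]

-- stage 5: one iteration of the i loop
theorem pvI_step (N MR SV c : Nat) (hc : c < N) (t : List (List (List Int)))
    (ht : t = pvOut N (MR+1) (SV+1) c (pvLayer (MR+1) (SV+1) c)) :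
    pvIBody (MR:Int) (SV:Int) t ((c:Int)+1) = pvOut N (MR+1) (SV+1) (c+1) (pvLayer (MR+1) (SV+1) (c+1)) := by
  subst ht
  unfold pvIBody
  rw [pvCast_succ c, pvCast_succ SV, pvRange0, List.foldl_map, pvStage2 N MR SV c hc,
    pvCast_succ MR, pvRange1, List.foldl_map]
  have h0 : pvOut N (MR+1) (SV+1) (c+1) (pvL0 (MR+1) (SV+1) c (SV+1))
      = pvOut N (MR+1) (SV+1) (c+1) (pvPart (MR+1) (SV+1) c 0) := by
    apply pvOut_congr
    unfold pvL0 pvPart; apply pvMapRangeCongr; intro r hr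
    by_cases h1 : r = 0
    · subst h1; rw [if_pos rfl, if_pos (le_refl _)]
      unfold pvR0; apply pvMapRangeCongr; intro k hk
      rw [if_pos (by omega), pvCell_zero]
    · rw [if_neg h1, if_neg (by omega)]
  rw [h0]
  have h := pvFoldInv (fun t (jc : Nat) => pvJBody (SV:Int) ((c+1 : Nat):Int) t ((jc:Int)+1))
    (fun jj t => t = pvOut N (MR+1) (SV+1) (c+1) (pvPart (MR+1) (SV+1) c jj)) MR _ rfl
    (fun jc x hjc hx => pvJ_step N MR SV c jc hc hjc x hx)
  rw [h]
  apply pvOut_congr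
  rw [show pvLayer (MR+1) (SV+1) (c+1) = pvStep (MR+1) (SV+1) (pvLayer (MR+1) (SV+1) c) from rfl]
  unfold pvPart pvStep; apply pvMapRangeCongr; intro r hr
  rw [if_pos (by omega)]

-- main lemma for port A on the nondegenerate shape
theorem pvA_main (mn mx : Int) (N MR SV : Nat) (hm : mx - mn = (MR:Int)) :
    getSolTableSorted_py (N:Int) mn mx (SV:Int) = pvTable N (MR+1) (SV+1) := by
  rw [pvA_unfold, hm, pvCast_succ N, pvCast_succ MR, pvCast_succ SV, pvRange0 (N+1),
    pvRange0 (MR+1), pvRange0 (SV+1), List.foldl_map, List.map_map]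
  rw [show ((List.range (N+1)).map ((fun _ => ((List.range (MR+1)).map (fun (k : Nat) => (k:Int))).map fun _ =>
        ((List.range (SV+1)).map (fun (k : Nat) => (k:Int))).map fun _ => (0:Int)) ∘ fun (k : Nat) => (k:Int)))
        = pvOut N (MR+1) (SV+1) 0 (pvBaseP (MR+1) (SV+1) 0) from by
      unfold pvOut
      apply pvMapRangeCongr; intro r hr
      by_cases h1 : r = 0
      · subst h1; rw [if_neg (by omega), if_pos rfl]
        unfold pvBaseP; simp only [Function.comp_def, List.map_map]
        apply pvMapRangeCongr; intro q hq
        rw [if_neg (by omega)]; rfl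
      · rw [if_neg (by omega), if_neg h1]
        unfold pvZ; simp only [Function.comp_def, List.map_map]
        apply pvMapRangeCongr; intro q hq; rfl]
  rw [pvStage1, pvRange1 N, List.foldl_map]
  have h := pvFoldInv (fun t (c : Nat) => pvIBody (MR:Int) (SV:Int) t ((c:Int)+1))
    (fun c t => t = pvOut N (MR+1) (SV+1) c (pvLayer (MR+1) (SV+1) c)) N
    (pvOut N (MR+1) (SV+1) 0 (pvBase (MR+1) (SV+1)))
    rfl (fun c x hcn hx => pvI_step N MR SV c hcn x hx)
  rw [h]
  unfold pvOut pvTable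
  apply pvMapRangeCongr; intro r hr
  by_cases h1 : r < N
  · rw [if_pos h1]
  · rw [if_neg h1, if_pos (by omega), show r = N from by omega]


-- ===== VERDICT (by name: the statement is the Claim_ definition above) =====
theorem getSolTableSorted_py_spec : Claim_equal_getSolTableSorted_py := by
  intro n mn mx sum _ hpre
  unfold Spec_getSolTableSorted_py
  rcases hpre with ⟨h1, h2⟩
  by_cases hmr : 0 ≤ mx - mn
  · obtain ⟨hn, hs⟩ := h1 hmr
    obtain ⟨N, rfl⟩ : ∃ N : Nat, n = (N:Int) := ⟨n.toNat, by omega⟩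
    obtain ⟨SV, rfl⟩ : ∃ S : Nat, sum = (S:Int) := ⟨sum.toNat, by omega⟩
    obtain ⟨MR, hm⟩ : ∃ M : Nat, mx - mn = (M:Int) := ⟨(mx - mn).toNat, by omega⟩
    rw [pvA_main mn mx N MR SV hm, pvB_main mn mx N MR SV hm]
  · -- degenerate: mx - mn < 0, so the inner dimensions are empty
    have hmr' : mx - mn < 0 := by omega
    have hnil1 : PySem.List.pyRange 0 (mx-mn+1) 1 = [] := PySem.List.pyRange_one_eq_nil (by omega)
    have hnil2 : PySem.List.pyRange 1 (mx-mn+1) 1 = [] := PySem.List.pyRange_one_eq_nil (by omega)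
    by_cases hn : n < 0
    · have hnil3 : PySem.List.pyRange 0 (n+1) 1 = [] := PySem.List.pyRange_one_eq_nil (by omega)
      have hnil4 : PySem.List.pyRange 1 (n+1) 1 = [] := PySem.List.pyRange_one_eq_nil (by omega)
      rw [pvA_unfold, pvB_unfold]
      simp [hnil1, hnil3, hnil4]
    · have hA : getSolTableSorted_py n mn mx sum
          = (PySem.List.pyRange 0 (n+1) 1).map (fun _ => ([] : List (List Int))) := by
        rw [pvA_unfold]
        simp only [hnil1, List.foldl_nil, List.map_nil]
        rcases h2 hmr' with hc | hc
        · rw [show PySem.List.pyRange 1 (n+1) 1 = [] from PySem.List.pyRange_one_eq_nil (by omega),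
            List.foldl_nil]
        · have hnilS : PySem.List.pyRange 0 (sum+1) 1 = [] := PySem.List.pyRange_one_eq_nil (by omega)
          have hid : ∀ (l : List Int) (t : List (List (List Int))), l.foldl (pvIBody (mx-mn) sum) t = t := by
            intro l
            induction l with
            | nil => intro t; rfl
            | cons x xs ih =>
              intro t
              rw [List.foldl_cons,
                show pvIBody (mx-mn) sum t x = t from by
                  unfold pvIBody; rw [hnil2, hnilS, List.foldl_nil, List.foldl_nil],
                ih]
          rw [hid]
      have hB : getSolTableSorted_py_alt n mn mx sum
          = (PySem.List.pyRange 0 (n+1) 1).map (fun _ => ([] : List (List Int))) := by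
        rw [pvB_unfold]
        have hfun : pvBBody (mx-mn) sum = fun t _ => t ++ [([] : List (List Int))] := by
          funext t i
          unfold pvBBody
          simp only [hnil1, List.map_nil, List.foldl_nil, ite_self]
        rw [hfun, PySem.List.foldl_append_singleton_eq_map (f := fun _ => ([] : List (List Int))),
          List.nil_append]
      rw [hA, hB]
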